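-- pv_equiv track=rewrite | github.com/bslhrzg/cigen | src/qp2cigen.py | QP2CIgen
-- ===== SOURCE A (Python) =====
-- def QP2CIgen(a,b,N) :
--     ########################################################
--     #### This function transform the determinant (a,b)  ####
--     #### from QP into the form suitable for CIgen       ####
--     ########################################################
--
--     def decabtocbs(a,b,N):
--         # take the decimal rep of spin up and down (a,b)
--         # create the corresponding binary string by merging them
--         # reverse the order by construction
--         c=''
--         n=int(N/2)
--         for k in range(n):
--             ca = a & 1 #is odd ?
--             cb = b & 1
--             a, b = a // 2, b // 2
--             c+='1' if ca else '0'
--             c+= '1' if cb else '0'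
--         return c
--
--     bsc=decabtocbs(a,b,N)
--
--     c=int(bsc,2)
--
--     return c
-- ===== SOURCE B (Python) =====
-- def QP2CIgen(a, b, N):
--     # Same value as A wherever A returns (N >= 2): instead of extracting bits one
--     # by one in a loop, format each operand's low n bits as a reversed n-wide
--     # binary string and interleave the two strings, then parse the result.
--     n = int(N / 2)
--     sa = format(a % (1 << n), 'b').zfill(n)[::-1]
--     sb = format(b % (1 << n), 'b').zfill(n)[::-1]
--     return int(''.join(x + y for x, y in zip(sa, sb)), 2)
-- ===== Notes on version B (the rewrite author's own statement) =====
-- stated objective: alternative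
-- what changed: A extracts one bit of each operand per loop iteration, appending two characters per step to build the interleaved string; B has no bit loop at all: it formats each operand's low n bits as a reversed zero-padded binary string with format/zfill and interleaves the two whole strings with zip/join before the final int(s,2).
import Mathlib
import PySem

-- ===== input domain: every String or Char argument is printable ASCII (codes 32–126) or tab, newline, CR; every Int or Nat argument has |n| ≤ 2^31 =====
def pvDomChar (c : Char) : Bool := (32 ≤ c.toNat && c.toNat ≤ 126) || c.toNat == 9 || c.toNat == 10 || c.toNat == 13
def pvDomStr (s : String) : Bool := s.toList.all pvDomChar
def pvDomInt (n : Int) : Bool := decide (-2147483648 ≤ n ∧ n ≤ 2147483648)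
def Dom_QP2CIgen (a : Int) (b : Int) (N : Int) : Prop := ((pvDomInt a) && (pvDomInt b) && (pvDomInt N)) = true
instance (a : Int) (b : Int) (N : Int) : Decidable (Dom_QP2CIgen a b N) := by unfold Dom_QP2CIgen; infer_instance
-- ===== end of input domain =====

-- B replaces A's extract-one-bit-per-iteration interleaving loop with whole-string
-- formatting: reversed n-wide binary strings of the two operands, zipped together;
-- objective: different decomposition of the same computation (alternative).

-- ===== PORT A =====
-- the 'for k in range(n)' loop of decabtocbs: state (a, b, c); chars appended in the loop's order
def pvDecLoop : Nat → Int → Int → List Char → List Char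
  | 0, _, _, c => c
  | Nat.succ k, a, b, c =>
      let ca := PySem.Int.band a 1        -- a & 1
      let cb := PySem.Int.band b 1        -- b & 1
      pvDecLoop k (PySem.Int.floordiv a 2) (PySem.Int.floordiv b 2)
        (c ++ [if ca ≠ 0 then '1' else '0', if cb ≠ 0 then '1' else '0'])

-- int(s, 2), ported by hand (used by both ports — both Pythons call int(s, 2)): exact here
-- because both programs hand it a nonempty (under Pre_) string over {'0','1'} only — no sign,
-- whitespace or underscore — where int(s, 2) is this base-2 fold; the empty string
-- (N < 2 in A, ValueError) is excluded by Pre_QP2CIgen.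
def pvParseBin (cs : List Char) : Int :=
  cs.foldl (fun acc ch => 2 * acc + (if ch = '1' then 1 else 0)) 0

def QP2CIgen (a : Int) (b : Int) (N : Int) : Int :=
  -- n = int(N/2): truncating division (PySem.Int.truncdiv); range(n) empty when n ≤ 0
  pvParseBin (pvDecLoop (PySem.Int.truncdiv N 2).toNat a b [])

-- ===== PORT B =====
-- format(m, 'b') for m ≥ 0, by hand (PySem has no binary format): digits MSB first, '0' for 0;
-- tail-recursive: emit the lowest binary digit and prepend it to the accumulator
def pvBinDigitsAux : Nat → List Char → List Char
  | 0, acc => acc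
  | Nat.succ m, acc =>
      pvBinDigitsAux (Nat.succ m / 2) ((if Nat.succ m % 2 = 1 then '1' else '0') :: acc)
decreasing_by exact Nat.div_lt_self (Nat.succ_pos m) (by norm_num)

def pvFormatB (m : Nat) : List Char := if m = 0 then ['0'] else pvBinDigitsAux m []

-- s.zfill(n): pad with '0' on the left up to length n
def pvZfill (n : Nat) (cs : List Char) : List Char := List.replicate (n - cs.length) '0' ++ cs

-- ''.join(x + y for x, y in zip(sa, sb)): pairwise interleave, stopping at the shorter
-- string like zip does; tail-recursive with a reversed accumulator (join is linear)
def pvInterleave : List Char → List Char → List Char → List Char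
  | x :: xs, y :: ys, acc => pvInterleave xs ys (y :: x :: acc)
  | _, _, acc => acc.reverse

def QP2CIgen_alt (a : Int) (b : Int) (N : Int) : Int :=
  let n := (PySem.Int.truncdiv N 2).toNat                 -- n = int(N/2)
  -- sa = format(a % (1 << n), 'b').zfill(n)[::-1]  (a % (1 << n) ≥ 0, so toNat is exact)
  let sa := (pvZfill n (pvFormatB (PySem.Int.mod a ((1 : Int) <<< n)).toNat)).reverse
  let sb := (pvZfill n (pvFormatB (PySem.Int.mod b ((1 : Int) <<< n)).toNat)).reverse
  -- int(''.join(x + y for x, y in zip(sa, sb)), 2)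
  pvParseBin (pvInterleave sa sb [])

-- ===== PRECONDITION & SPEC =====
-- Pre_ excludes exactly N < 2, where n = int(N/2) ≤ 0, bsc = '' and A raises ValueError in int('', 2).
def Pre_QP2CIgen (a : Int) (b : Int) (N : Int) : Prop := 2 ≤ N
instance (a : Int) (b : Int) (N : Int) : Decidable (Pre_QP2CIgen a b N) := by unfold Pre_QP2CIgen; infer_instance
def pvWitness_QP2CIgen : Int × Int × Int := (3, 2, 4)

def Spec_QP2CIgen (a : Int) (b : Int) (N : Int) (out : Int) : Prop := out = QP2CIgen_alt a b N
instance (a : Int) (b : Int) (N : Int) (out : Int) : Decidable (Spec_QP2CIgen a b N out) := by unfold Spec_QP2CIgen; infer_instance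

-- ===== CLAIM (what is proved, stated in full; the proofs are below) =====
def Claim_equal_QP2CIgen : Prop := ∀ (a : Int) (b : Int) (N : Int), Dom_QP2CIgen a b N → Pre_QP2CIgen a b N → Spec_QP2CIgen a b N (QP2CIgen a b N)

-- ===== LEMMAS AND PROOFS =====

-- A's per-iteration bit characters, LSB first
def pvBitsLSB : Nat → Int → List Char
  | 0, _ => []
  | Nat.succ k, a =>
      (if PySem.Int.band a 1 ≠ 0 then '1' else '0') :: pvBitsLSB k (PySem.Int.floordiv a 2)

-- the same characters computed Nat-side by halving, LSB first
def pvNatBits : Nat → Nat → List Char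
  | 0, _ => []
  | Nat.succ k, m => (if m % 2 = 1 then '1' else '0') :: pvNatBits k (m / 2)

-- the accumulator of the tail-recursive digit emitter factors out
theorem pvBinDigitsAux_acc (m : Nat) : ∀ (acc : List Char),
    pvBinDigitsAux m acc = pvBinDigitsAux m [] ++ acc := by
  induction m using Nat.strong_induction_on with
  | _ m ih =>
    match m with
    | 0 => intro acc; simp [pvBinDigitsAux]
    | Nat.succ j =>
      intro acc
      rw [pvBinDigitsAux, pvBinDigitsAux,
          ih (Nat.succ j / 2) (Nat.div_lt_self (Nat.succ_pos j) (by norm_num)),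
          ih (Nat.succ j / 2) (Nat.div_lt_self (Nat.succ_pos j) (by norm_num))
            [if Nat.succ j % 2 = 1 then '1' else '0']]
      simp

-- the interleave accumulator is the reversed prefix already emitted
theorem pvInterleave_eq_zip (xs : List Char) : ∀ (ys acc : List Char),
    pvInterleave xs ys acc = acc.reverse ++ (List.zip xs ys).flatMap (fun p => [p.1, p.2]) := by
  induction xs with
  | nil => intro ys acc; cases ys <;> simp [pvInterleave]
  | cons x xs ih =>
      intro ys acc
      cases ys with
      | nil => simp [pvInterleave]
      | cons y ys => rw [pvInterleave, ih]; simp [List.zip_cons_cons]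

theorem pvDecLoop_append (k : Nat) : ∀ (a b : Int) (c : List Char),
    pvDecLoop k a b c = c ++ pvDecLoop k a b [] := by
  induction k with
  | zero => intro a b c; simp [pvDecLoop]
  | succ k ih =>
      intro a b c
      simp only [pvDecLoop, List.nil_append]
      rw [ih, ih (PySem.Int.floordiv a 2) (PySem.Int.floordiv b 2) [_, _]]
      simp

-- A's loop is the interleaving of the two bit-character sequences
theorem pvDecLoop_eq_zip (k : Nat) : ∀ (a b : Int),
    pvDecLoop k a b [] = (List.zip (pvBitsLSB k a) (pvBitsLSB k b)).flatMap (fun p => [p.1, p.2]) := by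
  induction k with
  | zero => intro a b; simp [pvDecLoop, pvBitsLSB]
  | succ k ih =>
      intro a b
      simp only [pvDecLoop, List.nil_append]
      rw [pvDecLoop_append, ih]
      simp [pvBitsLSB, List.zip_cons_cons]

-- the zero-padded binary rendering of m < 2^(k+1), reversed, is its k+1 low bits LSB first
theorem pvZfill_formatB (k : Nat) : ∀ (m : Nat), m < 2 ^ (k + 1) →
    pvZfill (k + 1) (pvFormatB m) = (pvNatBits (k + 1) m).reverse := by
  induction k with
  | zero =>
      intro m hm
      have : m = 0 ∨ m = 1 := by omega
      rcases this with h | h <;> subst h <;>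
        simp [pvZfill, pvFormatB, pvNatBits, pvBinDigitsAux]
  | succ k ih =>
      intro m hm
      have hhalf : m / 2 < 2 ^ (k + 1) := by
        rw [Nat.div_lt_iff_lt_mul (by norm_num)]
        calc m < 2 ^ (k + 2) := hm
        _ = 2 ^ (k + 1) * 2 := by ring
      have hrev : (pvNatBits (k + 2) m).reverse
          = (pvNatBits (k + 1) (m / 2)).reverse ++ [if m % 2 = 1 then '1' else '0'] := by
        simp [pvNatBits]
      rw [hrev, ← ih (m / 2) hhalf]
      rcases Nat.lt_or_ge m 2 with h2 | h2
      · -- m = 0 or 1: format is a single character, both sides are all-'0' padding plus it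
        have : m = 0 ∨ m = 1 := by omega
        rcases this with h | h <;> subst h <;>
          simp [pvFormatB, pvZfill, pvBinDigitsAux, List.replicate_succ']
      · -- m ≥ 2: peel the last binary digit of m and match the paddings
        obtain ⟨j, hj⟩ : ∃ j, m = j + 1 := ⟨m - 1, by omega⟩
        have hdig : pvBinDigitsAux m [] = pvBinDigitsAux (m / 2) [] ++ [if m % 2 = 1 then '1' else '0'] := by
          rw [hj]
          show pvBinDigitsAux (Nat.succ j) [] = _
          rw [pvBinDigitsAux]
          rw [pvBinDigitsAux_acc (Nat.succ j / 2)]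
        have hm2 : m / 2 ≠ 0 := by omega
        have hfb : pvFormatB (m / 2) = pvBinDigitsAux (m / 2) [] := by simp [pvFormatB, hm2]
        have hfm : pvFormatB m = pvBinDigitsAux m [] := by simp [pvFormatB]; omega
        rw [hfm, hfb, hdig]
        simp only [pvZfill, List.length_append, List.length_singleton]
        rw [show k + 2 - ((pvBinDigitsAux (m / 2) []).length + 1)
              = k + 1 - (pvBinDigitsAux (m / 2) []).length by omega]
        simp [List.append_assoc]

-- halving an emod by 2·p is the emod by p of the half
theorem pv_half_mod (a p : Int) (hp : 0 < p) : (a % (2 * p)) / 2 = (a / 2) % p := by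
  have h := Int.mul_ediv_add_emod a (2 * p)
  have h2 : 0 ≤ a % (2 * p) := Int.emod_nonneg a (by positivity)
  have h3 : a % (2 * p) < 2 * p := Int.emod_lt_of_pos a (by positivity)
  set q := a / (2 * p) with hq
  set r := a % (2 * p) with hr
  have ha : a = r + q * p * 2 := by linarith [h]
  have hdiv : a / 2 = r / 2 + q * p := by
    rw [ha, Int.add_mul_ediv_right _ _ (by norm_num : (2 : Int) ≠ 0)]
  have hb1 : 0 ≤ r / 2 := Int.ediv_nonneg h2 (by norm_num)
  have hb2 : r / 2 < p := by omega
  rw [hdiv, show r / 2 + q * p = r / 2 + p * q by ring, Int.add_mul_emod_self_left]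
  exact (Int.emod_eq_of_lt hb1 hb2).symm

-- the Nat-side bits of a % 2^k are exactly A's bit characters of a
theorem pvNatBits_mod (k : Nat) : ∀ (a : Int),
    pvNatBits k (PySem.Int.mod a ((2 : Int) ^ k)).toNat = pvBitsLSB k a := by
  induction k with
  | zero => intro a; simp [pvNatBits, pvBitsLSB]
  | succ k ih =>
      intro a
      have hp : (0 : Int) < 2 ^ k := by positivity
      have hP : (0 : Int) < 2 ^ (k + 1) := by positivity
      rw [PySem.Int.mod_eq_emod_of_pos hP]
      set x := a % ((2 : Int) ^ (k + 1)) with hx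
      have hx0 : 0 ≤ x := Int.emod_nonneg a (by positivity)
      have hlow : x % 2 = a % 2 := Int.emod_emod_of_dvd a ⟨2 ^ k, by ring⟩
      have hband : PySem.Int.band a 1 = a % 2 := by
        rw [PySem.Int.band_one, PySem.Int.mod_eq_emod_of_pos (by norm_num : (0:Int) < 2)]
      have hbit : (x.toNat % 2 = 1) = (PySem.Int.band a 1 ≠ 0) := by
        have ha2a : 0 ≤ a % 2 := Int.emod_nonneg a (by norm_num)
        have ha2b : a % 2 < 2 := Int.emod_lt_of_pos a (by norm_num)
        rw [hband]
        apply propext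
        omega
      have hhalf : x.toNat / 2 = (PySem.Int.mod (PySem.Int.floordiv a 2) ((2 : Int) ^ k)).toNat := by
        rw [PySem.Int.mod_eq_emod_of_pos hp,
            PySem.Int.floordiv_eq_ediv_of_pos (by norm_num : (0 : Int) < 2)]
        have := pv_half_mod a (2 ^ k) hp
        rw [show (2 : Int) * 2 ^ k = 2 ^ (k + 1) by ring] at this
        omega
      simp only [pvNatBits, pvBitsLSB, hbit, hhalf, ih]

-- ===== VERDICT (by name: the statement is the Claim_ definition above) =====
theorem QP2CIgen_spec : Claim_equal_QP2CIgen := by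
  intro a b N _ hpre
  have hN : (2 : Int) ≤ N := hpre
  show QP2CIgen a b N = QP2CIgen_alt a b N
  unfold QP2CIgen QP2CIgen_alt
  set n := (PySem.Int.truncdiv N 2).toNat with hn
  have hn1 : 1 ≤ n := by
    have ht : PySem.Int.truncdiv N 2 = N / 2 := by
      unfold PySem.Int.truncdiv
      exact Int.tdiv_eq_ediv_of_nonneg (by omega)
    have h2 : 1 ≤ N / 2 := by omega
    omega
  obtain ⟨k, hk⟩ : ∃ k, n = k + 1 := ⟨n - 1, by omega⟩
  have hshift : ((1 : Int) <<< n) = (2 : Int) ^ n := by simp [Int.shiftLeft_eq]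
  have hside : ∀ (x : Int),
      (pvZfill n (pvFormatB (PySem.Int.mod x ((1 : Int) <<< n)).toNat)).reverse
        = pvBitsLSB n x := by
    intro x
    have hxP : (0 : Int) < 2 ^ n := by positivity
    have hxlt : (PySem.Int.mod x ((2 : Int) ^ n)).toNat < 2 ^ n := by
      have h1 := PySem.Int.mod_nonneg x (b := (2 : Int) ^ n) (by positivity)
      have h2 := PySem.Int.mod_lt x (b := (2 : Int) ^ n) (by positivity)
      have hcast : ((2 ^ n : Nat) : Int) = (2 : Int) ^ n := by push_cast; ring
      omega
    rw [hshift, hk] at *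
    rw [pvZfill_formatB k _ hxlt, List.reverse_reverse, pvNatBits_mod]
  rw [pvDecLoop_eq_zip]
  simp only [pvInterleave_eq_zip, List.reverse_nil, List.nil_append, hside]
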